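-- pv_equiv track=rewrite | github.com/PolinaFomina/PostgreSQL | Lab3/3.2/Parser/main.py | getCharacterName
-- ===== SOURCE A (Python) =====
-- def getCharacterName(line):
--
--     name = []
--     index = 0
--
--     while index < len(line) and line[index] != '[':
--         index = index + 1
--
--     index = index + 1
--     if index < len(line):
--         while index < len(line) and line[index] != ']':
--             name.append(line[index])
--             index = index + 1
--
--     name = ''.join(name)
--     name = name.replace('\"', '')
--     name = name.replace('\\', '')
--     return name
-- ===== SOURCE B (Python) =====
-- def getCharacterName(line):
--     start = line.find('[')
--     if start == -1:
--         return ''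
--     end = line.find(']', start + 1)
--     if end == -1:
--         end = len(line)
--     return line[start + 1:end].replace('"', '').replace('\\', '')
-- ===== Notes on version B (the rewrite author's own statement) =====
-- stated objective: faster
-- what changed: Replaced the two character-by-character index loops with list append/join by find-based index computation plus a single slice with two replaces.
import Mathlib
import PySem

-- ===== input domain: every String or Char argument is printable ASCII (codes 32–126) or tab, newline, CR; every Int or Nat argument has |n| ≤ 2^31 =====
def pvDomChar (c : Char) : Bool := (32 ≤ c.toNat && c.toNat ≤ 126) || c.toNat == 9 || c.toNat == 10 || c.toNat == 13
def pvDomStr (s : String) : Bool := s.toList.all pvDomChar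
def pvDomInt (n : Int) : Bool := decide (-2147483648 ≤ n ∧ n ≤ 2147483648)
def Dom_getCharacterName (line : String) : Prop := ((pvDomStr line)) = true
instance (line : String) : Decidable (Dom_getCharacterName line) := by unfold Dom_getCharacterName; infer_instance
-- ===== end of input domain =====

-- B replaces A's two index-driven character loops by find-based index computation and one slice; objective: simpler.

-- ===== PORT A =====
-- first while loop: advance past characters until (and including) the first '['
def pvA_find (cs : List Char) : List Char :=
  match cs with
  | [] => []
  | c :: rest => if c = '[' then rest else pvA_find rest

-- second while loop: append characters into `name` until ']' or end of line
def pvA_take (cs : List Char) (acc : List Char) : List Char :=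
  match cs with
  | [] => acc
  | c :: rest => if c = ']' then acc else pvA_take rest (acc ++ [c])

def getCharacterName (line : String) : String :=
  let name := String.ofList (pvA_take (pvA_find line.toList) [])
  PySem.Str.replace (PySem.Str.replace name "\"" "") "\\" ""

-- ===== PORT B =====
def getCharacterName_alt (line : String) : String :=
  let start := PySem.Str.find line "["
  if start = -1 then "" else
    let stop := PySem.Str.findFrom line "]" (start + 1)
    let stop := if stop = -1 then (line.toList.length : Int) else stop
    let name := String.ofList (PySem.List.slice line.toList (some (start + 1)) (some stop))
    PySem.Str.replace (PySem.Str.replace name "\"" "") "\\" ""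

-- ===== PRECONDITION & SPEC =====
def Spec_getCharacterName (line : String) (out : String) : Prop := out = getCharacterName_alt line
instance (line : String) (out : String) : Decidable (Spec_getCharacterName line out) := by unfold Spec_getCharacterName; infer_instance

-- ===== CLAIM (what is proved, stated in full; the proofs are below) =====
def Claim_equal_getCharacterName : Prop := ∀ (line : String), Dom_getCharacterName line → Spec_getCharacterName line (getCharacterName line)

-- ===== LEMMAS AND PROOFS =====

lemma singleton_prefix_iff (a : Char) (l : List Char) : [a] <+: l ↔ ∃ t, l = a :: t := by
  cases l with
  | nil => simp
  | cons c t => constructor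
                · rintro ⟨s, hs⟩; simp at hs; exact ⟨t, by simp [hs.1]⟩
                · rintro ⟨t', ht⟩; cases ht; exact ⟨t, rfl⟩

lemma singleton_infix_of_mem (a : Char) (l : List Char) (h : a ∈ l) : [a] <:+: l := by
  obtain ⟨s, t, hst⟩ := List.append_of_mem h
  exact ⟨s, t, by simp [hst]⟩

lemma pvA_find_no_bracket (cs : List Char) (h : '[' ∉ cs) : pvA_find cs = [] := by
  induction cs with
  | nil => rfl
  | cons c t ih =>
    simp at h
    simp [pvA_find, Ne.symm h.1, ih h.2]

lemma pvA_find_at (k : ℕ) (cs : List Char) (hk : cs.drop k = '[' :: cs.drop (k + 1))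
    (hmin : ∀ i, i < k → ¬ ([ '[' ] <+: cs.drop i)) : pvA_find cs = cs.drop (k + 1) := by
  induction k generalizing cs with
  | zero =>
    simp at hk
    obtain ⟨t, ht⟩ : ∃ t, cs = '[' :: t := ⟨_, hk⟩
    simp [ht, pvA_find]
  | succ k ih =>
    cases cs with
    | nil => simp at hk
    | cons c t =>
      have hc : c ≠ '[' := by
        intro h; exact hmin 0 (Nat.succ_pos _) (by simp [h])
      simp [pvA_find, hc]
      exact ih t hk (fun i hi => hmin (i + 1) (by omega))

lemma pvA_take_eq (cs acc : List Char) :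
    pvA_take cs acc = acc ++ cs.takeWhile (fun c => c ≠ ']') := by
  induction cs generalizing acc with
  | nil => simp [pvA_take]
  | cons c t ih =>
    by_cases h : c = ']'
    · simp [pvA_take, h, List.takeWhile]
    · simp [pvA_take, h, ih, List.takeWhile, List.append_assoc]

lemma takeWhile_no_close (cs : List Char) (h : ']' ∉ cs) :
    cs.takeWhile (fun c => c ≠ ']') = cs := by
  induction cs with
  | nil => rfl
  | cons c t ih =>
    simp at h
    rw [List.takeWhile_cons_of_pos (by simp [Ne.symm h.1])]
    rw [ih h.2]

lemma takeWhile_at (m : ℕ) (cs : List Char) (hm : cs.drop m = ']' :: cs.drop (m + 1))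
    (hmin : ∀ i, i < m → ¬ ([ ']' ] <+: cs.drop i)) :
    cs.takeWhile (fun c => c ≠ ']') = cs.take m := by
  induction m generalizing cs with
  | zero =>
    simp at hm
    obtain ⟨t, ht⟩ : ∃ t, cs = ']' :: t := ⟨_, hm⟩
    rw [ht, List.takeWhile_cons_of_neg (by simp)]
    simp
  | succ m ih =>
    cases cs with
    | nil => simp at hm
    | cons c t =>
      have hc : c ≠ ']' := by
        intro h; exact hmin 0 (Nat.succ_pos _) (by simp [h])
      rw [List.takeWhile_cons_of_pos (by simp [hc]), List.take_succ_cons]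
      exact congrArg (c :: ·) (ih t hm (fun i hi => hmin (i + 1) (by omega)))

-- ===== VERDICT (by name: the statement is the Claim_ definition above) =====
theorem getCharacterName_spec : Claim_equal_getCharacterName := by
  intro line _
  unfold Spec_getCharacterName
  simp only [getCharacterName, getCharacterName_alt, PySem.Str.find_eq, PySem.Str.findFrom_eq]
  by_cases hfind : PySem.Chars.find line.toList ("[".toList) = -1
  · rw [if_pos hfind]
    have hnotin : '[' ∉ line.toList := fun hm =>
      (PySem.Chars.find_eq_neg_one_iff _ _).mp hfind (by simpa using singleton_infix_of_mem '[' _ hm)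
    rw [pvA_find_no_bracket _ hnotin]
    decide
  · rw [if_neg hfind]
    have hneg1 := PySem.Chars.neg_one_le_find line.toList "[".toList
    have h0 : 0 ≤ PySem.Chars.find line.toList "[".toList := by omega
    obtain ⟨k, hk⟩ : ∃ k : ℕ, PySem.Chars.find line.toList "[".toList = (k : Int) :=
      ⟨(PySem.Chars.find line.toList "[".toList).toNat, (Int.toNat_of_nonneg h0).symm⟩
    have hspec := PySem.Chars.find_spec (s := line.toList) (sub := "[".toList) h0
    rw [hk] at hspec
    simp only [Int.toNat_natCast] at hspec
    have hsl : ("[" : String).toList = ['['] := rfl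
    rw [hsl] at hspec
    obtain ⟨t, ht⟩ := (singleton_prefix_iff '[' _).mp hspec.1
    have hdrop : line.toList.drop (k + 1) = t := by
      rw [← List.tail_drop, ht]
      rfl
    have hfA : pvA_find line.toList = line.toList.drop (k + 1) := by
      apply pvA_find_at k
      · rw [ht, hdrop]
      · exact hspec.2
    have hklt : k < line.toList.length := by
      by_contra hle
      have h2 := List.drop_eq_nil_of_le (as := line.toList) (Nat.le_of_not_lt hle)
      rw [ht] at h2
      cases h2
    have hff := PySem.Chars.findFrom_natCast line.toList ("]".toList) (k + 1) (by omega)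
    rw [hk]
    have hcast : (k : Int) + 1 = ((k + 1 : ℕ) : Int) := by push_cast; ring
    rw [hcast, hff]
    by_cases h2 : PySem.Chars.find (line.toList.drop (k + 1)) "]".toList = -1
    · simp only [h2, if_pos]
      have hnotin : ']' ∉ line.toList.drop (k + 1) := fun hm =>
        (PySem.Chars.find_eq_neg_one_iff _ _).mp h2 (by simpa using singleton_infix_of_mem ']' _ hm)
      rw [hfA, pvA_take_eq, takeWhile_no_close _ hnotin, List.nil_append]
      rw [PySem.List.slice_natCast]
      have htk : (line.toList.drop (k + 1)).take (line.toList.length - (k + 1)) = line.toList.drop (k + 1) :=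
        List.take_of_length_le (by simp)
      rw [htk]
    · have hneg2 := PySem.Chars.neg_one_le_find (line.toList.drop (k + 1)) "]".toList
      have h02 : 0 ≤ PySem.Chars.find (line.toList.drop (k + 1)) "]".toList := by omega
      obtain ⟨m, hm⟩ : ∃ m : ℕ, PySem.Chars.find (line.toList.drop (k + 1)) "]".toList = (m : Int) :=
        ⟨_, (Int.toNat_of_nonneg h02).symm⟩
      have hspec2 := PySem.Chars.find_spec (s := line.toList.drop (k + 1)) (sub := "]".toList) h02
      rw [hm] at hspec2
      simp only [Int.toNat_natCast] at hspec2
      have hsr : ("]" : String).toList = [']'] := rfl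
      rw [hsr] at hspec2
      obtain ⟨u, hu⟩ := (singleton_prefix_iff ']' _).mp hspec2.1
      have hdrop2 : (line.toList.drop (k + 1)).drop (m + 1) = u := by
        rw [← List.tail_drop, hu]
        rfl
      have htw : (line.toList.drop (k + 1)).takeWhile (fun c => c ≠ ']') = (line.toList.drop (k + 1)).take m := by
        apply takeWhile_at m
        · rw [hu, hdrop2]
        · exact hspec2.2
      rw [hm]
      have hmne : ¬ ((m : Int) = -1) := by omega
      rw [if_neg hmne, if_neg (by push_cast; omega)]
      rw [hfA, pvA_take_eq, htw, List.nil_append]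
      rw [PySem.List.slice_natCast_add]
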